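-- pv_equiv track=rewrite | github.com/mayubo2333/fewshot_ED | utils.py | cut_pred_res
-- ===== SOURCE A (Python) =====
-- def cut_pred_res(pred_labels, gt_res_list):
--     gt_len_list = [len(gt_res) for gt_res in gt_res_list]
--     assert(sum(gt_len_list)==len(pred_labels))
--
--     pred_res_list = list()
--     curr = 0
--     for gt_len in gt_len_list:
--         pred_res = pred_labels[curr:(curr+gt_len)]
--         pred_res_list.append(pred_res)
--         curr += gt_len
--     return pred_res_list
-- ===== SOURCE B (Python) =====
-- def cut_pred_res(pred_labels, gt_res_list):
--     assert sum(len(gt_res) for gt_res in gt_res_list) == len(pred_labels)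
--     it = iter(pred_labels)
--     return [[next(it) for _ in gt_res] for gt_res in gt_res_list]
-- ===== Notes on version B (the rewrite author's own statement) =====
-- stated objective: idiomatic
-- what changed: B consumes pred_labels through a single forward iterator (one next() per element) inside a nested comprehension, eliminating A's running offset and explicit slice bounds.
import Mathlib
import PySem

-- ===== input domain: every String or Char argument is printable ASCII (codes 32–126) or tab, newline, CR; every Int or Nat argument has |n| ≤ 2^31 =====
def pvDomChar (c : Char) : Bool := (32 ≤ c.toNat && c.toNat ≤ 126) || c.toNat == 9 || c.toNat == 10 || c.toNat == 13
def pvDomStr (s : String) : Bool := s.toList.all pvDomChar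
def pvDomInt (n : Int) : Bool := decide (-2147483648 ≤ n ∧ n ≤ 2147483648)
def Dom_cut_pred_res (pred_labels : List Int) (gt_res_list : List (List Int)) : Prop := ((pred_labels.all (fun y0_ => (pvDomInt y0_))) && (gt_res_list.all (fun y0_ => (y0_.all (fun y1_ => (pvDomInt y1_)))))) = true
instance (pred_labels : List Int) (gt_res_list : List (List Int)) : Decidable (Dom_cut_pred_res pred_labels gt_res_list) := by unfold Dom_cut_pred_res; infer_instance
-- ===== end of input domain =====

-- B replaces A's running offset + explicit slices by a single forward consumption of
-- pred_labels (take/drop of the remainder per group); idiomatic, same O(n) cost.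

-- ===== PORT A =====
-- literal port of A: gt_len_list, then a loop with accumulator (pred_res_list, curr),
-- appending the slice pred_labels[curr:curr+gt_len]
def cut_pred_res (pred_labels : List Int) (gt_res_list : List (List Int)) : List (List Int) :=
  let gt_len_list : List Int := gt_res_list.map (fun gt_res => (gt_res.length : Int))
  (gt_len_list.foldl
    (fun (st : List (List Int) × Int) gt_len =>
      (st.1 ++ [PySem.List.slice pred_labels (some st.2) (some (st.2 + gt_len))], st.2 + gt_len))
    ([], 0)).1

-- ===== PORT B =====
-- literal port of B: the iterator over pred_labels is the remaining suffix; each group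
-- consumes (length of gt_res) elements from it
def cutAltGo (rem : List Int) (gts : List (List Int)) : List (List Int) :=
  match gts with
  | [] => []
  | gt_res :: rest => rem.take gt_res.length :: cutAltGo (rem.drop gt_res.length) rest

def cut_pred_res_alt (pred_labels : List Int) (gt_res_list : List (List Int)) : List (List Int) :=
  cutAltGo pred_labels gt_res_list

-- ===== PRECONDITION & SPEC =====
-- Pre_ excludes exactly the inputs where A's assert fails (AssertionError): the group
-- lengths must sum to len(pred_labels). B keeps the same assert.
def Pre_cut_pred_res (pred_labels : List Int) (gt_res_list : List (List Int)) : Prop :=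
  (gt_res_list.map List.length).sum = pred_labels.length
instance (pred_labels : List Int) (gt_res_list : List (List Int)) : Decidable (Pre_cut_pred_res pred_labels gt_res_list) := by unfold Pre_cut_pred_res; infer_instance

def pvWitness_cut_pred_res : List Int × List (List Int) := ([1, 2, 3], [[7], [], [8, 9]])

def Spec_cut_pred_res (pred_labels : List Int) (gt_res_list : List (List Int)) (out : List (List Int)) : Prop := out = cut_pred_res_alt pred_labels gt_res_list
instance (pred_labels : List Int) (gt_res_list : List (List Int)) (out : List (List Int)) : Decidable (Spec_cut_pred_res pred_labels gt_res_list out) := by unfold Spec_cut_pred_res; infer_instance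

-- ===== CLAIM (what is proved, stated in full; the proofs are below) =====
def Claim_equal_cut_pred_res : Prop := ∀ (pred_labels : List Int) (gt_res_list : List (List Int)), Dom_cut_pred_res pred_labels gt_res_list → Pre_cut_pred_res pred_labels gt_res_list → Spec_cut_pred_res pred_labels gt_res_list (cut_pred_res pred_labels gt_res_list)

-- ===== LEMMAS AND PROOFS =====

-- loop invariant: after processing a prefix, A's accumulator is acc and curr = j, and the
-- remaining groups slice exactly what B's consumption of (pred_labels.drop j) produces
theorem cutA_foldl_eq (pred_labels : List Int) (gts : List (List Int))
    (acc : List (List Int)) (j : Nat) :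
    ((gts.map (fun g => (g.length : Int))).foldl
      (fun (st : List (List Int) × Int) gt_len =>
        (st.1 ++ [PySem.List.slice pred_labels (some st.2) (some (st.2 + gt_len))], st.2 + gt_len))
      (acc, (j : Int))).1
    = acc ++ cutAltGo (pred_labels.drop j) gts := by
  induction gts generalizing acc j with
  | nil => simp [cutAltGo]
  | cons g rest ih =>
    simp only [List.map_cons, List.foldl_cons]
    have hslice : PySem.List.slice pred_labels (some (j : Int)) (some ((j : Int) + (g.length : Int)))
        = (pred_labels.drop j).take g.length := PySem.List.slice_natCast_add ..
    have hj : (j : Int) + (g.length : Int) = ((j + g.length : Nat) : Int) := by push_cast; ring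
    rw [hslice, hj, ih]
    simp [cutAltGo, List.drop_drop]

theorem cut_pred_res_spec : Claim_equal_cut_pred_res := by
  intro pred_labels gt_res_list _ _
  show cut_pred_res pred_labels gt_res_list = cut_pred_res_alt pred_labels gt_res_list
  have h := cutA_foldl_eq pred_labels gt_res_list [] 0
  simpa [cut_pred_res, cut_pred_res_alt] using h
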